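-- pv_equiv track=rewrite | github.com/ChihyoA/HeCBenchmark_kernel_fission | working_benchmarks_task_level/BlackScholes/profiler.py | process_ncu_output
-- ===== SOURCE A (Python) =====
-- def process_ncu_output(output_text):
--     """Process NCU output and extract just the metrics data."""
--     lines = output_text.split('\n')
--     data_lines = []
--     in_data_section = False
--     headers = None
--
--     for line in lines:
--         # Skip empty lines and NCU output lines
--         if not line.strip() or line.startswith('=='):
--             continue
--
--         # Try to identify the header line
--         if not headers and ('Kernel Name' in line or 'ID' in line):
--             headers = line
--             data_lines.append(line)
--             in_data_section = True
--             continue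
--
--         # If we're in the data section, add the line
--         if in_data_section and line.strip() and not line.startswith('=='):
--             data_lines.append(line)
--
--     return '\n'.join(data_lines) if data_lines else None
-- ===== SOURCE B (Python) =====
-- def process_ncu_output(output_text):
--     """Process NCU output and extract just the metrics data."""
--     kept = [line for line in output_text.split('\n')
--             if line.strip() and not line.startswith('==')]
--     for i, line in enumerate(kept):
--         if 'Kernel Name' in line or 'ID' in line:
--             return '\n'.join(kept[i:])
--     return None
-- ===== Notes on version B (the rewrite author's own statement) =====
-- stated objective: simpler
-- what changed: Replaces the flag-driven state machine (in_data_section/headers accumulator) with a locate-then-filter decomposition: filter the noise lines once, then return the suffix starting at the first header-like line.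
import Mathlib
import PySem

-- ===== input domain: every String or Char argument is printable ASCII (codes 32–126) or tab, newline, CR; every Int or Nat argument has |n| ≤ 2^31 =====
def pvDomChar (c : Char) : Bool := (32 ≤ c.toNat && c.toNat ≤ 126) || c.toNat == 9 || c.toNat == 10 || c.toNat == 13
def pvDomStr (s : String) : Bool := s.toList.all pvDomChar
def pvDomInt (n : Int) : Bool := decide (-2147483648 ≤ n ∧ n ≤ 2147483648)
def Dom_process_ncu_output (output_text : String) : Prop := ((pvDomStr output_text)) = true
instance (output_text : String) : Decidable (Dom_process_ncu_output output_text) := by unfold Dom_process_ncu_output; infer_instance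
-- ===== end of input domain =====

-- B replaces A's flag-driven state machine with a locate-then-filter decomposition (same cost, simpler).

-- ===== PORT A =====
-- Python truthiness of the `headers` variable (None or a str): falsy iff None or "".
def pvFalsy (headers : Option String) : Bool :=
  match headers with
  | none => true
  | some h => h == ""

-- the for-loop of A, state = (data_lines, in_data_section, headers)
def pvLoopA : List String → List String → Bool → Option String → List String
  | [], acc, _, _ => acc
  | line :: rest, acc, inData, headers =>
    if PySem.Str.strip line == "" || PySem.Str.startswith line "==" then
      pvLoopA rest acc inData headers
    else if pvFalsy headers && (PySem.Str.isIn "Kernel Name" line || PySem.Str.isIn "ID" line) then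
      pvLoopA rest (acc ++ [line]) true (some line)
    else if inData && !(PySem.Str.strip line == "") && !PySem.Str.startswith line "==" then
      pvLoopA rest (acc ++ [line]) inData headers
    else
      pvLoopA rest acc inData headers

def process_ncu_output (output_text : String) : Option String :=
  let lines := (PySem.Str.split? output_text "\n").getD []
  let data_lines := pvLoopA lines [] false none
  if data_lines == [] then none else some (PySem.Str.join "\n" data_lines)

-- ===== PORT B =====
def pvGood (line : String) : Bool :=
  !(PySem.Str.strip line == "") && !PySem.Str.startswith line "=="

def pvMarker (line : String) : Bool :=
  PySem.Str.isIn "Kernel Name" line || PySem.Str.isIn "ID" line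

-- the for-i-loop over kept: return the join of the suffix at the first marker line
def pvFindB : List String → Option String
  | [] => none
  | line :: rest =>
    if pvMarker line then some (PySem.Str.join "\n" (line :: rest)) else pvFindB rest

def process_ncu_output_alt (output_text : String) : Option String :=
  pvFindB (((PySem.Str.split? output_text "\n").getD []).filter pvGood)

-- ===== PRECONDITION & SPEC =====
def Spec_process_ncu_output (output_text : String) (out : Option String) : Prop := out = process_ncu_output_alt output_text
instance (output_text : String) (out : Option String) : Decidable (Spec_process_ncu_output output_text out) := by unfold Spec_process_ncu_output; infer_instance

-- ===== CLAIM (what is proved, stated in full; the proofs are below) =====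
def Claim_equal_process_ncu_output : Prop := ∀ (output_text : String), Dom_process_ncu_output output_text → Spec_process_ncu_output output_text (process_ncu_output output_text)

-- ===== LEMMAS AND PROOFS =====

-- the suffix of kept lines at the first marker line
def pvFindL : List String → List String
  | [] => []
  | line :: rest => if pvMarker line then line :: rest else pvFindL rest

theorem pvFindB_eq (kept : List String) :
    pvFindB kept = match pvFindL kept with
      | [] => none
      | xs => some (PySem.Str.join "\n" xs) := by
  induction kept with
  | nil => rfl
  | cons l rest ih =>
    simp only [pvFindB, pvFindL]
    split_ifs with h <;> simp [ih]

theorem pvLoopA_after (lines : List String) (acc : List String) (h : String)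
    (hh : (h == "") = false) :
    pvLoopA lines acc true (some h) = acc ++ lines.filter pvGood := by
  induction lines generalizing acc with
  | nil => simp [pvLoopA]
  | cons l rest ih =>
    simp only [pvLoopA, pvFalsy, hh, Bool.false_and, List.filter]
    by_cases hg : (PySem.Str.strip l == "" || PySem.Str.startswith l "==") = true
    · rw [if_pos hg, ih]
      have hb : pvGood l = false := by
        unfold pvGood
        rcases Bool.or_eq_true_iff.mp hg with h1 | h1 <;> rw [h1] <;> simp
      simp [hb]
    · rw [if_neg hg]
      have hg' : (PySem.Str.strip l == "") = false ∧ PySem.Str.startswith l "==" = false := by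
        simp only [Bool.or_eq_true_iff, not_or, Bool.not_eq_true] at hg
        exact hg
      have hgood : pvGood l = true := by unfold pvGood; rw [hg'.1, hg'.2]; rfl
      simp only [hg'.1, hg'.2, Bool.not_false, Bool.and_self, if_true, ih, hgood]
      simp

theorem strip_ne_empty_ne (l : String) (h : (PySem.Str.strip l == "") = false) :
    (l == "") = false := by
  by_contra hc
  simp only [Bool.not_eq_false, beq_iff_eq] at hc
  subst hc
  exact absurd (by decide : (PySem.Str.strip "" == "") = true) (by simp [h])

theorem pvLoopA_before (lines : List String) :
    pvLoopA lines [] false none = pvFindL (lines.filter pvGood) := by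
  induction lines with
  | nil => rfl
  | cons l rest ih =>
    simp only [pvLoopA, pvFalsy, Bool.true_and, List.filter]
    by_cases hg : (PySem.Str.strip l == "" || PySem.Str.startswith l "==") = true
    · rw [if_pos hg]
      have hb : pvGood l = false := by
        unfold pvGood
        rcases Bool.or_eq_true_iff.mp hg with h1 | h1 <;> rw [h1] <;> simp
      simp [hb, ih]
    · rw [if_neg hg]
      have hg' : (PySem.Str.strip l == "") = false ∧ PySem.Str.startswith l "==" = false := by
        simp only [Bool.or_eq_true_iff, not_or, Bool.not_eq_true] at hg
        exact hg
      have hgood : pvGood l = true := by unfold pvGood; rw [hg'.1, hg'.2]; rfl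
      by_cases hm : pvMarker l = true
      · have hm' : (PySem.Str.isIn "Kernel Name" l || PySem.Str.isIn "ID" l) = true := hm
        rw [if_pos hm', pvLoopA_after _ _ _ (strip_ne_empty_ne l hg'.1)]
        simp only [hgood, if_true, pvFindL, hm]
        simp
      · have hm0 : pvMarker l = false := Bool.not_eq_true _ ▸ Bool.eq_false_iff.mpr hm
        have hm' : (PySem.Str.isIn "Kernel Name" l || PySem.Str.isIn "ID" l) = false := hm0
        rw [if_neg (by rw [hm']; simp)]
        simp only [Bool.false_and, ih, hgood, pvFindL, hm0]
        simp

-- ===== VERDICT (by name: the statement is the Claim_ definition above) =====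
theorem process_ncu_output_spec : Claim_equal_process_ncu_output := by
  intro t _
  unfold Spec_process_ncu_output process_ncu_output process_ncu_output_alt
  dsimp only
  rw [pvLoopA_before, pvFindB_eq]
  cases pvFindL (((PySem.Str.split? t "\n").getD []).filter pvGood) <;> simp
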